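-- pv_equiv track=rewrite | github.com/Gen-Spider/Pass-Bot | passbot_modified.py | _extract_all_mobile_fragments
-- ===== SOURCE A (Python) =====
-- from typing import List, Dict, Set, Optional, Tuple, Iterator
--
-- def _extract_all_mobile_fragments(mobile: str) -> List[str]:
--     """Extract ALL possible fragments from mobile number"""
--     mobile = str(mobile).strip()
--     fragments = set()
--
--     # All possible substrings of length 2-10
--     for start in range(len(mobile)):
--         for end in range(start + 2, min(start + 11, len(mobile) + 1)):
--             fragment = mobile[start:end]
--             if fragment.isdigit() and len(fragment) >= 2:
--                 fragments.add(fragment)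
--
--     return list(fragments)
-- ===== SOURCE B (Python) =====
-- def _extract_all_mobile_fragments(mobile: str):
--     """Extract ALL possible fragments from mobile number"""
--     mobile = str(mobile).strip()
--
--     # Stage 1: partition the string into maximal runs of consecutive digits.
--     runs = []
--     cur = ""
--     for ch in mobile:
--         if ch.isdigit():
--             cur += ch
--         else:
--             if cur:
--                 runs.append(cur)
--             cur = ""
--     if cur:
--         runs.append(cur)
--
--     # Stage 2: every valid fragment lives entirely inside one run;
--     # enumerate, per run, all substrings of length 2..10.
--     fragments = set()
--     for run in runs:
--         L = len(run)
--         for i in range(L):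
--             for k in range(2, min(10, L - i) + 1):
--                 fragments.add(run[i:i + k])
--     return list(fragments)
-- ===== Notes on version B (the rewrite author's own statement) =====
-- stated objective: faster
-- what changed: B is a two-stage algorithm: one linear pass partitions the stripped string into maximal digit runs, then the length-2..10 substrings are enumerated inside each run, so A's per-candidate slice+isdigit test disappears.
import Mathlib
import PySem

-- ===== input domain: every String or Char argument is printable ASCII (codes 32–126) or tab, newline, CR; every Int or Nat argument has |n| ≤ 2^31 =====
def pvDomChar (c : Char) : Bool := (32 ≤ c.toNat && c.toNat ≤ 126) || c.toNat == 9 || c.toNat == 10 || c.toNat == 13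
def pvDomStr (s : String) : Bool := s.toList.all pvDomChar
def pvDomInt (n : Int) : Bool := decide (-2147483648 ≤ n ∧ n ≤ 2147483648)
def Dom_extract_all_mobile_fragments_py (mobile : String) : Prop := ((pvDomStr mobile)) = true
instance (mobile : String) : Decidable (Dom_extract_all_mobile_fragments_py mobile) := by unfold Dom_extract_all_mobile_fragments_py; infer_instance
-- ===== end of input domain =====

-- B first partitions the stripped string into maximal digit runs in one pass, then enumerates
-- the length-2..10 substrings inside each run; A slices and isdigit-tests every candidate window.
-- Both Pythons return list(set(...)); Python's hash iteration order is not modelled: both ports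
-- produce the set in first-insertion order (the standard PySem.Set convention).

-- ===== PORT A =====
def extract_all_mobile_fragments_py (mobile : String) : List String :=
  let m := PySem.Str.strip mobile
  (PySem.List.pyRange 0 (PySem.Str.len m) 1).foldl
    (fun fragments start =>
      (PySem.List.pyRange (start + 2) (min (start + 11) (PySem.Str.len m + 1)) 1).foldl
        (fun fragments e =>
          let fragment := PySem.Str.slice m (some start) (some e)
          if PySem.Str.strIsdigit fragment && decide (2 ≤ PySem.Str.len fragment) then
            PySem.Set.add fragments fragment
          else fragments)
        fragments)
    (PySem.Set.empty : PySem.Set String)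

-- ===== PORT B =====
-- Python strings are modelled as their character lists (the PySem.Chars convention):
-- 'cur += ch' is cur ++ [ch], 'runs.append(cur)' is runs ++ [cur], run[i:i+k] is PySem.List.slice.
-- 'ch.isdigit()' is PySem.Chars.isdigit, exact on the ASCII domain.
def extract_all_mobile_fragments_py_alt (mobile : String) : List String :=
  let m := PySem.Str.strip mobile
  let st := m.toList.foldl
    (fun (st : List (List Char) × List Char) ch =>
      if PySem.Chars.isdigit ch then (st.1, st.2 ++ [ch])
      else (if st.2 ≠ [] then st.1 ++ [st.2] else st.1, []))
    ([], [])
  let runs := if st.2 ≠ [] then st.1 ++ [st.2] else st.1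
  runs.foldl
    (fun fragments run =>
      let L := (run.length : Int)
      (PySem.List.pyRange 0 L 1).foldl
        (fun fragments i =>
          (PySem.List.pyRange 2 (min 10 (L - i) + 1) 1).foldl
            (fun fragments k =>
              PySem.Set.add fragments (String.ofList (PySem.List.slice run (some i) (some (i + k)))))
            fragments)
        fragments)
    (PySem.Set.empty : PySem.Set String)

-- ===== PRECONDITION & SPEC =====
def Spec_extract_all_mobile_fragments_py (mobile : String) (out : List String) : Prop := out = extract_all_mobile_fragments_py_alt mobile
instance (mobile : String) (out : List String) : Decidable (Spec_extract_all_mobile_fragments_py mobile out) := by unfold Spec_extract_all_mobile_fragments_py; infer_instance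

-- ===== CLAIM (what is proved, stated in full; the proofs are below) =====
def Claim_equal_extract_all_mobile_fragments_py : Prop := ∀ (mobile : String), Dom_extract_all_mobile_fragments_py mobile → Spec_extract_all_mobile_fragments_py mobile (extract_all_mobile_fragments_py mobile)

-- ===== LEMMAS AND PROOFS =====

-- The fragments contributed by a digit block t (insertion order): its prefixes of length 2..10.
def pvF (t : List Char) : List String :=
  (List.range (min 10 t.length - 1)).map (fun j => String.ofList (t.take (2 + j)))

-- A's insertion sequence: one block per start position (its digit run, read off by takeWhile).
def pvSeqStarts (l : List Char) : List String :=
  (List.range l.length).flatMap (fun s => pvF ((l.drop s).takeWhile PySem.Chars.isdigit))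

-- The maximal digit runs of l, in order.
def pvRuns : List Char → List (List Char)
  | [] => []
  | c :: t =>
    if PySem.Chars.isdigit c then
      ((c :: t).takeWhile PySem.Chars.isdigit) :: pvRuns ((c :: t).dropWhile PySem.Chars.isdigit)
    else pvRuns t
termination_by l => l.length
decreasing_by
  · rename_i h
    have := List.length_dropWhile_le PySem.Chars.isdigit t
    simp [h]
    omega
  · simp

-- B's insertion sequence: per run, per offset, the prefixes of length 2..10.
def pvRunSeq (r : List Char) : List String :=
  (List.range r.length).flatMap (fun i => pvF (r.drop i))

def pvSeqRuns (l : List Char) : List String :=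
  (pvRuns l).flatMap pvRunSeq

-- pvRuns with a pending (still open) run cur in front.
def pvRunsAux : List Char → List Char → List (List Char)
  | cur, [] => if cur = [] then [] else [cur]
  | cur, c :: t =>
    if PySem.Chars.isdigit c then pvRunsAux (cur ++ [c]) t
    else (if cur = [] then [] else [cur]) ++ pvRunsAux [] t

lemma takeWhile_dropWhile_self {α : Type} (p : α → Bool) (l : List α) :
    (l.dropWhile p).takeWhile p = [] := by
  cases h : l.dropWhile p with
  | nil => rfl
  | cons c t =>
    have hc : p c = false := by
      have := List.head_dropWhile_not p (l := l) (by simp [h])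
      simpa [h] using this
    simp [hc]

lemma take_takeWhile_eq {α : Type} (p : α → Bool) (l : List α) (k : Nat)
    (hk : k ≤ (l.takeWhile p).length) : (l.takeWhile p).take k = l.take k := by
  obtain ⟨c, hc⟩ := List.takeWhile_prefix (p := p) (l := l)
  conv_rhs => rw [← hc]
  rw [List.take_append_of_le_length hk]

lemma all_take_eq (p : Char → Bool) (t : List Char) (k : Nat) (hk : k ≤ t.length) :
    (t.take k).all p = decide (k ≤ (t.takeWhile p).length) := by
  induction t generalizing k with
  | nil =>
    simp only [List.length_nil, Nat.le_zero] at hk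
    simp [hk]
  | cons c t ih =>
    cases k with
    | zero => simp
    | succ k =>
      simp only [List.take_succ_cons, List.all_cons, List.takeWhile_cons]
      by_cases h : p c
      · rw [ih k (by simpa using hk)]
        simp [h]
      · simp [h]

lemma filter_lt_range (m k : Nat) :
    (List.range m).filter (fun j => decide (j < k)) = List.range (min m k) := by
  induction m with
  | zero => simp
  | succ m ih =>
    rw [List.range_succ, List.filter_append, ih]
    by_cases h : m < k
    · have h1 : min (m + 1) k = min m k + 1 := by omega
      have h2 : min m k = m := by omega
      simp [h, h2, List.range_succ]
    · have h1 : min (m + 1) k = min m k := by omega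
      simp [h, h1]

-- the body of B's stage-1 loop, named for the proofs
def pvStep (st : List (List Char) × List Char) (ch : Char) : List (List Char) × List Char :=
  if PySem.Chars.isdigit ch then (st.1, st.2 ++ [ch])
  else (if st.2 ≠ [] then st.1 ++ [st.2] else st.1, [])

lemma pvRunsAux_eq (l : List Char) : ∀ cur : List Char,
    pvRunsAux cur l = if cur = [] then pvRuns l
      else (cur ++ l.takeWhile PySem.Chars.isdigit) :: pvRuns (l.dropWhile PySem.Chars.isdigit) := by
  induction l with
  | nil =>
    intro cur
    by_cases h : cur = [] <;> simp [pvRunsAux, pvRuns, h]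
  | cons c t ih =>
    intro cur
    by_cases hc : PySem.Chars.isdigit c
    · rw [pvRunsAux, if_pos hc, ih (cur ++ [c])]
      by_cases h : cur = [] <;>
        simp [h, pvRuns, hc]
    · rw [pvRunsAux, if_neg hc, ih []]
      by_cases h : cur = [] <;>
        simp [h, pvRuns, hc]

-- stage 1 of B: the char fold plus the final flush computes pvRuns (with pending run cur)
lemma stage1_eq (l : List Char) : ∀ (rs : List (List Char)) (cur : List Char),
    (if (l.foldl pvStep (rs, cur)).2 ≠ [] then (l.foldl pvStep (rs, cur)).1 ++ [(l.foldl pvStep (rs, cur)).2]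
     else (l.foldl pvStep (rs, cur)).1) = rs ++ pvRunsAux cur l := by
  induction l with
  | nil =>
    intro rs cur
    by_cases h : cur = [] <;> simp [pvRunsAux, h]
  | cons c t ih =>
    intro rs cur
    by_cases hc : PySem.Chars.isdigit c
    · simp only [List.foldl_cons, pvStep, hc, if_true, pvRunsAux]
      exact ih rs (cur ++ [c])
    · simp only [List.foldl_cons, pvStep, hc, Bool.false_eq_true, if_false, pvRunsAux]
      rw [ih _ []]
      by_cases h : cur = [] <;> simp [h, List.append_assoc]

-- A's inner loop over end positions, reduced to the canonical block pvF
lemma inner_A (m : String) (s : Nat) (hs : s < m.toList.length) (fr : PySem.Set String) :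
    List.foldl
      (fun fragments e =>
        if PySem.Str.strIsdigit (PySem.Str.slice m (some ((s : Nat) : Int)) (some e)) &&
            decide (2 ≤ PySem.Str.len (PySem.Str.slice m (some ((s : Nat) : Int)) (some e))) then
          PySem.Set.add fragments (PySem.Str.slice m (some ((s : Nat) : Int)) (some e))
        else fragments)
      fr (PySem.List.pyRange (((s : Nat) : Int) + 2) (min (((s : Nat) : Int) + 11) ((m.toList.length : Int) + 1)) 1)
    = (pvF ((m.toList.drop s).takeWhile PySem.Chars.isdigit)).foldl PySem.Set.add fr := by
  have hL : PySem.Str.len m = (m.toList.length : Int) := PySem.Str.len_eq m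
  set L := m.toList.length with hLdef
  set t := m.toList.drop s with htdef
  set lead := (t.takeWhile PySem.Chars.isdigit).length with hleaddef
  have htlen : t.length = L - s := by simp [htdef, hLdef]
  have hleadle : lead ≤ L - s := by
    have := (List.takeWhile_sublist (p := PySem.Chars.isdigit) (l := t)).length_le
    omega
  rw [PySem.List.pyRange_one, List.foldl_map]
  have hMa : ((min (((s : Nat) : Int) + 11) ((L : Int) + 1)) - (((s : Nat) : Int) + 2)).toNat
      = min 9 (L - s - 1) := by omega
  rw [hMa]
  refine Eq.trans (PySem.List.foldl_congr_mem _ _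
      (fun fragments j =>
        if decide (2 + j ≤ lead) then
          PySem.Set.add fragments (String.ofList ((t.takeWhile PySem.Chars.isdigit).take (2 + j)))
        else fragments)
      fr ?_) ?_
  · intro acc j hj
    simp only [List.mem_range] at hj
    simp only []
    have harg : ((s : Nat) : Int) + 2 + (j : Int) = ((s : Nat) : Int) + ((2 + j : Nat) : Int) := by
      push_cast; ring
    rw [harg]
    have hfrag : (PySem.Str.slice m (some ((s : Nat) : Int))
        (some (((s : Nat) : Int) + ((2 + j : Nat) : Int)))).toList = t.take (2 + j) := by
      rw [PySem.Str.toList_slice, PySem.Chars.slice_eq_listSlice, PySem.List.slice_natCast_add, htdef]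
    have hlen : (t.take (2 + j)).length = 2 + j := by
      rw [List.length_take]; omega
    have hcond : (PySem.Str.strIsdigit (PySem.Str.slice m (some ((s : Nat) : Int))
          (some (((s : Nat) : Int) + ((2 + j : Nat) : Int)))) &&
        decide (2 ≤ PySem.Str.len (PySem.Str.slice m (some ((s : Nat) : Int))
          (some (((s : Nat) : Int) + ((2 + j : Nat) : Int)))))) = decide (2 + j ≤ lead) := by
      rw [PySem.Str.strIsdigit_eq, PySem.Str.len_eq, hfrag]
      unfold PySem.Chars.strIsdigit
      rw [all_take_eq PySem.Chars.isdigit t (2 + j) (by omega)]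
      have hne : (t.take (2 + j)).isEmpty = false := by
        cases hE : t.take (2 + j) with
        | nil => exfalso; rw [hE] at hlen; simp at hlen; omega
        | cons a l => rfl
      rw [hne, hlen, ← hleaddef]
      simp
    rw [hcond]
    by_cases hcase : 2 + j ≤ lead
    · have hstr : PySem.Str.slice m (some ((s : Nat) : Int))
          (some (((s : Nat) : Int) + ((2 + j : Nat) : Int)))
          = String.ofList ((t.takeWhile PySem.Chars.isdigit).take (2 + j)) := by
        apply String.toList_inj.mp
        rw [hfrag, String.toList_ofList, take_takeWhile_eq PySem.Chars.isdigit t (2 + j) (by omega)]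
      rw [hstr, decide_eq_true hcase]
    · simp [hcase]
  · rw [PySem.List.foldl_if_eq_foldl_filter]
    have hfeq : (List.range (min 9 (L - s - 1))).filter (fun j => decide (2 + j ≤ lead))
        = List.range (min (min 9 (L - s - 1)) (lead - 1)) := by
      rw [← filter_lt_range (min 9 (L - s - 1)) (lead - 1)]
      exact List.filter_congr (fun j _ => by simp only [decide_eq_decide]; omega)
    rw [hfeq]
    unfold pvF
    rw [List.foldl_map, ← hleaddef]
    have hrange : min (min 9 (L - s - 1)) (lead - 1) = min 10 lead - 1 := by omega
    rw [hrange]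

-- A = fold of Set.add over the per-start insertion sequence
lemma A_eq_seq (mobile : String) :
    extract_all_mobile_fragments_py mobile
      = (pvSeqStarts (PySem.Str.strip mobile).toList).foldl PySem.Set.add [] := by
  unfold extract_all_mobile_fragments_py pvSeqStarts
  dsimp only
  rw [List.foldl_flatMap]
  simp only [PySem.Str.len_eq]
  rw [PySem.List.pyRange_zero_natCast, List.foldl_map]
  apply PySem.List.foldl_congr_mem
  intro acc s hmem
  rw [List.mem_range] at hmem
  exact inner_A (PySem.Str.strip mobile) s hmem acc

-- B's inner loop over lengths, reduced to the canonical block pvF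
lemma inner_B (r : List Char) (i : Nat) (fr : PySem.Set String) :
    List.foldl
      (fun fragments k =>
        PySem.Set.add fragments (String.ofList (PySem.List.slice r (some ((i : Nat) : Int)) (some (((i : Nat) : Int) + k)))))
      fr (PySem.List.pyRange 2 (min 10 ((r.length : Int) - ((i : Nat) : Int)) + 1) 1)
    = (pvF (r.drop i)).foldl PySem.Set.add fr := by
  rw [PySem.List.pyRange_one, List.foldl_map]
  have hM : ((min 10 ((r.length : Int) - ((i : Nat) : Int)) + 1) - 2).toNat
      = min 10 ((r.drop i).length) - 1 := by
    rw [List.length_drop]; omega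
  rw [hM]
  unfold pvF
  rw [List.foldl_map]
  apply PySem.List.foldl_congr_mem
  intro acc j _
  have harg : ((i : Nat) : Int) + ((2 : Int) + (j : Int)) = ((i : Nat) : Int) + ((2 + j : Nat) : Int) := by
    push_cast; ring
  rw [harg, PySem.List.slice_natCast_add]

-- B = fold of Set.add over the per-run insertion sequence
lemma B_eq_seq (mobile : String) :
    extract_all_mobile_fragments_py_alt mobile
      = (pvSeqRuns (PySem.Str.strip mobile).toList).foldl PySem.Set.add [] := by
  unfold extract_all_mobile_fragments_py_alt pvSeqRuns
  dsimp only
  have hstep : (fun (st : List (List Char) × List Char) ch =>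
      if PySem.Chars.isdigit ch then (st.1, st.2 ++ [ch])
      else (if st.2 ≠ [] then st.1 ++ [st.2] else st.1, [])) = pvStep := rfl
  rw [hstep, stage1_eq, pvRunsAux_eq, if_pos rfl, List.nil_append, List.foldl_flatMap]
  apply PySem.List.foldl_congr_mem
  intro acc r _
  unfold pvRunSeq
  rw [List.foldl_flatMap]
  rw [PySem.List.pyRange_zero_natCast, List.foldl_map]
  apply PySem.List.foldl_congr_mem
  intro acc2 i _
  exact inner_B r i acc2

-- the heart: scanning every start position visits exactly the runs' offsets
lemma seq_eq (l : List Char) : pvSeqStarts l = pvSeqRuns l := by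
  induction l using pvRuns.induct with
  | case1 => simp [pvSeqStarts, pvSeqRuns, pvRuns]
  | case2 c t hc ih =>
    set r := (c :: t).takeWhile PySem.Chars.isdigit with hr
    set rest := (c :: t).dropWhile PySem.Chars.isdigit with hrest
    have hsplit : r ++ rest = c :: t := List.takeWhile_append_dropWhile
    have hdig : ∀ x ∈ r, PySem.Chars.isdigit x = true := fun x hx => List.mem_takeWhile_imp hx
    have hlen : (c :: t).length = r.length + rest.length := by
      rw [← hsplit, List.length_append]
    unfold pvSeqStarts
    rw [hlen, List.range_add, List.flatMap_append, List.flatMap_map]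
    have hfirst : (List.range r.length).flatMap
        (fun s => pvF (((c :: t).drop s).takeWhile PySem.Chars.isdigit)) = pvRunSeq r := by
      unfold pvRunSeq
      apply List.flatMap_congr
      intro s hs
      rw [List.mem_range] at hs
      congr 1
      rw [← hsplit, List.drop_append_of_le_length (by omega),
        List.takeWhile_append_of_pos (fun x hx => hdig x (List.mem_of_mem_drop hx)),
        takeWhile_dropWhile_self, List.append_nil]
    have hsecond : (List.range rest.length).flatMap
        (fun j => pvF (((c :: t).drop (r.length + j)).takeWhile PySem.Chars.isdigit))
        = pvSeqRuns rest := by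
      rw [← ih]
      unfold pvSeqStarts
      apply List.flatMap_congr
      intro j _
      congr 2
      rw [← hsplit]
      exact List.drop_length_add_append j
    rw [hfirst, hsecond]
    unfold pvSeqRuns
    rw [pvRuns, if_pos hc, List.flatMap_cons]
  | case3 c t hc ih =>
    unfold pvSeqStarts
    rw [List.length_cons, List.range_succ_eq_map, List.flatMap_cons, List.flatMap_map]
    have h0 : pvF (((c :: t).drop 0).takeWhile PySem.Chars.isdigit) = [] := by
      simp [hc, pvF]
    rw [h0, List.nil_append]
    have hrest : (List.range t.length).flatMap
        (fun s => pvF (((c :: t).drop (Nat.succ s)).takeWhile PySem.Chars.isdigit))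
        = pvSeqStarts t := by
      unfold pvSeqStarts
      apply List.flatMap_congr
      intro s _
      rfl
    rw [hrest, ih]
    unfold pvSeqRuns
    rw [pvRuns, if_neg hc]

-- ===== VERDICT (by name: the statement is the Claim_ definition above) =====
theorem extract_all_mobile_fragments_py_spec : Claim_equal_extract_all_mobile_fragments_py := by
  intro mobile _
  unfold Spec_extract_all_mobile_fragments_py
  rw [A_eq_seq, B_eq_seq, seq_eq]
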